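-- pv_equiv track=rewrite | github.com/JunzheJosephZhu/Child_Speech_Diarization | src/metric.py | turn_sequence_to_segments
-- ===== SOURCE A (Python) =====
-- def turn_sequence_to_segments(x, tofind):
--     '''
--         input: binary labels [L]
--         output: list of [[st1, ed1], [st2, ed2], ...]
--     '''
--     segments = []
--     tracking = False
--     for current in range(len(x)):
--         if not tracking:
--             if x[current] == tofind:
--                 tracking = True
--                 start = current
--         else:
--             if x[current] != tofind:
--                 tracking = False
--                 segments.append((start, current))
--     if tracking:
--         segments.append((start, len(x)))
--     return segments
-- ===== SOURCE B (Python) =====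
-- def turn_sequence_to_segments(x, tofind):
--     '''
--         input: binary labels [L]
--         output: list of [[st1, ed1], [st2, ed2], ...]
--     '''
--     segments = []
--     i, n = 0, len(x)
--     while i < n:
--         j = i + 1
--         while j < n and (x[j] == tofind) == (x[i] == tofind):
--             j += 1
--         if x[i] == tofind:
--             segments.append((i, j))
--         i = j
--     return segments
-- ===== Notes on version B (the rewrite author's own statement) =====
-- stated objective: alternative
-- what changed: Replaces the tracking-flag state machine with trailing flush by a run-decomposition: scan maximal runs of equal key (x[i]==tofind) and emit (run start, run end) for matching runs, no flag and no final flush.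
import Mathlib
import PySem

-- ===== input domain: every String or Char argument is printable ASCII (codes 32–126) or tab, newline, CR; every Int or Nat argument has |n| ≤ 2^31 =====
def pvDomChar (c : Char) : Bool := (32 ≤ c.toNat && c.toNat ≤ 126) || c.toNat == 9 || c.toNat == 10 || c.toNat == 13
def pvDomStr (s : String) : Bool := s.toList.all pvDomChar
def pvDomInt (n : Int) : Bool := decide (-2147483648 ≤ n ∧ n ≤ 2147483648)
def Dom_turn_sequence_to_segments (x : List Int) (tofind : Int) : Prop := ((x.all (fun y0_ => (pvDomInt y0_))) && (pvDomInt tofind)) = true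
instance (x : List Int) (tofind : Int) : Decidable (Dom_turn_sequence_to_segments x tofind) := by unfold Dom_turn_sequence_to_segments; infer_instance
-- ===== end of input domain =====

-- B replaces A's tracking-flag state machine (with trailing flush) by a run-decomposition scan; alternative decomposition, same cost.
-- ===== PORT A =====
-- state: (segments, tracking, start); one step per element, index 'current' carried alongside (x[current] is the head).
def pvALoop (tofind : Int) : List Int → Int → List (Int × Int) → Bool → Int → List (Int × Int) × Bool × Int
  | [], _, segments, tracking, start => (segments, tracking, start)
  | y :: ys, current, segments, tracking, start =>
    if !tracking then
      if y == tofind then pvALoop tofind ys (current + 1) segments true current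
      else pvALoop tofind ys (current + 1) segments tracking start
    else
      if y != tofind then pvALoop tofind ys (current + 1) (segments ++ [(start, current)]) false start
      else pvALoop tofind ys (current + 1) segments tracking start

def turn_sequence_to_segments (x : List Int) (tofind : Int) : List (Int × Int) :=
  let s := pvALoop tofind x 0 [] false 0
  if s.2.1 then s.1 ++ [(s.2.2, (x.length : Int))] else s.1

-- ===== PORT B =====
-- inner while loop: length of the maximal run in ys sharing key k (= (elem == tofind))
def pvRun (tofind : Int) (k : Bool) (ys : List Int) : List Int := ys.takeWhile (fun e => (e == tofind) == k)

def pvBLoop (tofind : Int) (idx : Int) : List Int → List (Int × Int)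
  | [] => []
  | y :: ys =>
    let k := y == tofind
    let n : Int := 1 + (pvRun tofind k ys).length
    (if k then [(idx, idx + n)] else []) ++ pvBLoop tofind (idx + n) (ys.dropWhile (fun e => (e == tofind) == k))
  termination_by l => l.length
  decreasing_by simpa using Nat.lt_succ_of_le (List.length_dropWhile_le _ ys)

def turn_sequence_to_segments_alt (x : List Int) (tofind : Int) : List (Int × Int) :=
  pvBLoop tofind 0 x
def Spec_turn_sequence_to_segments (x : List Int) (tofind : Int) (out : List (Int × Int)) : Prop := out = turn_sequence_to_segments_alt x tofind
instance (x : List Int) (tofind : Int) (out : List (Int × Int)) : Decidable (Spec_turn_sequence_to_segments x tofind out) := by unfold Spec_turn_sequence_to_segments; infer_instance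

-- ===== CLAIM (what is proved, stated in full; the proofs are below) =====
def Claim_equal_turn_sequence_to_segments : Prop := ∀ (x : List Int) (tofind : Int), Dom_turn_sequence_to_segments x tofind → Spec_turn_sequence_to_segments x tofind (turn_sequence_to_segments x tofind)

-- ===== LEMMAS AND PROOFS =====

theorem pvStep_ft (tofind y : Int) (ys : List Int) (idx st : Int) (segs : List (Int × Int))
    (hy : (y == tofind) = true) :
    pvALoop tofind (y :: ys) idx segs false st = pvALoop tofind ys (idx + 1) segs true idx := by
  simp [pvALoop, hy]

theorem pvStep_ff (tofind y : Int) (ys : List Int) (idx st : Int) (segs : List (Int × Int))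
    (hy : (y == tofind) = false) :
    pvALoop tofind (y :: ys) idx segs false st = pvALoop tofind ys (idx + 1) segs false st := by
  simp [pvALoop, hy]

theorem pvStep_tt (tofind y : Int) (ys : List Int) (idx st : Int) (segs : List (Int × Int))
    (hy : (y == tofind) = true) :
    pvALoop tofind (y :: ys) idx segs true st = pvALoop tofind ys (idx + 1) segs true st := by
  simp [pvALoop, bne, hy]

theorem pvStep_tf (tofind y : Int) (ys : List Int) (idx st : Int) (segs : List (Int × Int))
    (hy : (y == tofind) = false) :
    pvALoop tofind (y :: ys) idx segs true st
      = pvALoop tofind ys (idx + 1) (segs ++ [(st, idx)]) false st := by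
  simp [pvALoop, bne, hy]

theorem pvSkip (tofind : Int) (idx : Int) (y : Int) (ys : List Int) (hy : (y == tofind) = false) :
    pvBLoop tofind idx (y :: ys) = pvBLoop tofind (idx + 1) ys := by
  rw [pvBLoop]
  simp only [hy]
  cases ys with
  | nil => simp [pvRun, pvBLoop]
  | cons z zs =>
    by_cases hz : (z == tofind) = true
    · simp [pvRun, hz]
    · simp only [Bool.not_eq_true] at hz
      rw [pvBLoop]
      simp only [pvRun, hz, List.takeWhile_cons, List.dropWhile_cons]
      simp only [beq_self_eq_true, if_true, List.length_cons, Bool.false_eq_true, if_false]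
      have : idx + (1 + ((List.takeWhile (fun e => (e == tofind) == false) zs).length + 1 : Nat))
          = idx + 1 + (1 + ((List.takeWhile (fun e => (e == tofind) == false) zs).length : Int)) := by
        push_cast; ring
      rw [this]

theorem pvLen_cons (idx : Int) (y : Int) (ys : List Int) :
    idx + (((y :: ys).length : Nat) : Int) = (idx + 1) + (ys.length : Int) := by
  push_cast [List.length_cons]; ring

theorem pvMain (tofind : Int) (l : List Int) :
    (∀ (idx : Int) (segs : List (Int × Int)) (st : Int),
      (let s := pvALoop tofind l idx segs false st
       if s.2.1 then s.1 ++ [(s.2.2, idx + (l.length : Int))] else s.1) = segs ++ pvBLoop tofind idx l)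
    ∧ (∀ (idx : Int) (segs : List (Int × Int)) (st : Int),
      (let s := pvALoop tofind l idx segs true st
       if s.2.1 then s.1 ++ [(s.2.2, idx + (l.length : Int))] else s.1)
        = segs ++ (st, idx + ((l.takeWhile (fun e => e == tofind)).length : Int))
            :: pvBLoop tofind (idx + ((l.takeWhile (fun e => e == tofind)).length : Int)) (l.dropWhile (fun e => e == tofind))) := by
  induction l with
  | nil =>
    refine ⟨fun idx segs st => ?_, fun idx segs st => ?_⟩ <;> simp [pvALoop, pvBLoop]
  | cons y ys ih =>
    obtain ⟨ihF, ihT⟩ := ih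
    by_cases hy : (y == tofind) = true
    · refine ⟨fun idx segs st => ?_, fun idx segs st => ?_⟩
      · -- not tracking, y matches: start tracking at idx
        show (if (pvALoop tofind (y :: ys) idx segs false st).2.1 then _ else _) = _
        rw [pvStep_ft tofind y ys idx st segs hy, pvLen_cons, ihT (idx + 1) segs idx]
        rw [pvBLoop]
        have hp : (fun e : Int => (e == tofind) == true) = (fun e : Int => e == tofind) := by
          funext e; simp
        simp only [pvRun, hy, if_true, hp]
        have : idx + (1 + ((List.takeWhile (fun e => e == tofind) ys).length : Int))
            = idx + 1 + ((List.takeWhile (fun e => e == tofind) ys).length : Int) := by ring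
        rw [this]; simp
      · -- tracking, y matches: continue
        show (if (pvALoop tofind (y :: ys) idx segs true st).2.1 then _ else _) = _
        rw [pvStep_tt tofind y ys idx st segs hy, pvLen_cons, ihT (idx + 1) segs st]
        simp only [List.takeWhile_cons, List.dropWhile_cons, hy, if_true, List.length_cons]
        have : idx + (((List.takeWhile (fun e => e == tofind) ys).length + 1 : Nat) : Int)
            = idx + 1 + ((List.takeWhile (fun e => e == tofind) ys).length : Int) := by
          push_cast; ring
        rw [this]
    · simp only [Bool.not_eq_true] at hy
      refine ⟨fun idx segs st => ?_, fun idx segs st => ?_⟩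
      · -- not tracking, y does not match: skip
        show (if (pvALoop tofind (y :: ys) idx segs false st).2.1 then _ else _) = _
        rw [pvStep_ff tofind y ys idx st segs hy, pvLen_cons, ihF (idx + 1) segs st,
          pvSkip tofind idx y ys hy]
      · -- tracking, y does not match: close segment at idx
        show (if (pvALoop tofind (y :: ys) idx segs true st).2.1 then _ else _) = _
        rw [pvStep_tf tofind y ys idx st segs hy, pvLen_cons, ihF (idx + 1) (segs ++ [(st, idx)]) st]
        simp [hy, pvSkip tofind idx y ys hy]

-- ===== VERDICT (by name: the statement is the Claim_ definition above) =====
theorem turn_sequence_to_segments_spec : Claim_equal_turn_sequence_to_segments := by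
  intro x tofind _
  unfold Spec_turn_sequence_to_segments turn_sequence_to_segments turn_sequence_to_segments_alt
  have h := (pvMain tofind x).1 0 [] 0
  simpa using h
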